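-- pv_equiv track=rewrite | github.com/afarroc/Management360 | events/gtd_analytics.py | _get_peak_hours
-- ===== SOURCE A (Python) =====
-- from typing import Dict, List, Optional, Tuple
--
-- def _get_peak_hours(hour_stats: Dict[str, int]) -> List[str]:
--     """Obtiene las horas de mayor productividad."""
--     if not hour_stats:
--         return []
--
--     max_count = max(hour_stats.values())
--     if max_count == 0:
--         return []
--
--     peak_hours = [hour for hour, count in hour_stats.items() if count == max_count]
--     return peak_hours
-- ===== SOURCE B (Python) =====
-- def _get_peak_hours(hour_stats):
--     """Obtiene las horas de mayor productividad."""
--     best = None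
--     result = []
--     for hour, count in hour_stats.items():
--         if best is None or count > best:
--             best = count
--             result = [hour]
--         elif count == best:
--             result.append(hour)
--     if best is None or best == 0:
--         return []
--     return result
-- ===== Notes on version B (the rewrite author's own statement) =====
-- stated objective: alternative
-- what changed: Replaced the two passes (max over values, then a filter comprehension) by a single traversal that maintains the running maximum together with the list of hours attaining it, with the empty/zero guards folded into one final check on the running maximum.
import Mathlib
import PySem

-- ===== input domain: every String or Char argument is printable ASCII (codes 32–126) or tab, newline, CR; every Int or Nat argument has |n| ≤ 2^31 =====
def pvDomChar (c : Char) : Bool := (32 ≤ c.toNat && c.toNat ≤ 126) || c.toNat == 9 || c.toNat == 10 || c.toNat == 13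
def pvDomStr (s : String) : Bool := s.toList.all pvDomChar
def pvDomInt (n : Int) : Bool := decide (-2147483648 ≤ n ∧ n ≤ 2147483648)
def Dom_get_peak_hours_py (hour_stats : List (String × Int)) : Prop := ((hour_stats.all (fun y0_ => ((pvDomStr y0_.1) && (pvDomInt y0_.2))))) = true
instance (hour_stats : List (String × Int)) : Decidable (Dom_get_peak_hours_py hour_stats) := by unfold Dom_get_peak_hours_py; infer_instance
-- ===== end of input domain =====

-- B fuses A's two passes (max over values, then filter) into one traversal keeping the running max and its hours together.


-- ===== PORT A =====
def get_peak_hours_py (hour_stats : List (String × Int)) : List String :=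
  if hour_stats = [] then []
  else
    match PySem.List.max? (hour_stats.map Prod.snd) (fun x => x) with
    | none => []
    | some max_count =>
      if max_count = 0 then []
      else (hour_stats.filter (fun p => p.2 = max_count)).map Prod.fst

-- ===== PORT B =====
def gphAltLoop : List (String × Int) → Option Int → List String → Option Int × List String
  | [], best, result => (best, result)
  | (hour, count) :: t, best, result =>
    match best with
    | none => gphAltLoop t (some count) [hour]
    | some b =>
      if count > b then gphAltLoop t (some count) [hour]
      else if count = b then gphAltLoop t (some b) (result ++ [hour])
      else gphAltLoop t (some b) result

def get_peak_hours_py_alt (hour_stats : List (String × Int)) : List String :=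
  match gphAltLoop hour_stats none [] with
  | (none, _) => []
  | (some b, result) => if b = 0 then [] else result

-- ===== PRECONDITION & SPEC =====
def Spec_get_peak_hours_py (hour_stats : List (String × Int)) (out : List String) : Prop := out = get_peak_hours_py_alt hour_stats
instance (hour_stats : List (String × Int)) (out : List String) : Decidable (Spec_get_peak_hours_py hour_stats out) := by unfold Spec_get_peak_hours_py; infer_instance

-- ===== CLAIM (what is proved, stated in full; the proofs are below) =====
def Claim_equal_get_peak_hours_py : Prop := ∀ (hour_stats : List (String × Int)), Dom_get_peak_hours_py hour_stats → Spec_get_peak_hours_py hour_stats (get_peak_hours_py hour_stats)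

-- ===== LEMMAS AND PROOFS =====

/-- Characterisation of B's loop started from a definite running maximum `m`:
it ends with the overall running maximum, and with the hours whose count equals it
(keeping the accumulator exactly when the maximum does not move past `m`). -/
lemma gphAltLoop_some (l : List (String × Int)) : ∀ (m : Int) (r : List String),
    gphAltLoop l (some m) r =
      (some ((l.map Prod.snd).foldl max m),
       (if (l.map Prod.snd).foldl max m = m then r else []) ++
         (l.filter (fun p => p.2 = (l.map Prod.snd).foldl max m)).map Prod.fst) := by
  induction l with
  | nil => intro m r; simp [gphAltLoop]
  | cons hd t ih =>
    intro m r
    obtain ⟨h, c⟩ := hd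
    by_cases hgt : c > m
    · have hmax : max m c = c := by omega
      have hM : c ≤ (t.map Prod.snd).foldl max c := (PySem.List.le_foldl_max _ _).1
      have hne : (t.map Prod.snd).foldl max c ≠ m := by omega
      simp [gphAltLoop, hgt, ih, List.filter, hmax, hne]
      by_cases hc : (t.map Prod.snd).foldl max c = c
      · simp [hc]
      · simp [hc, show ¬ (c = (t.map Prod.snd).foldl max c) from fun hx => hc hx.symm]
    · by_cases heq : c = m
      · subst heq
        have hmax : max c c = c := by omega
        have hM : c ≤ (t.map Prod.snd).foldl max c := (PySem.List.le_foldl_max _ _).1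
        simp [gphAltLoop, hgt, ih, List.filter, hmax]
        by_cases hc : (t.map Prod.snd).foldl max c = c
        · simp [hc]
        · simp [hc, show ¬ (c = (t.map Prod.snd).foldl max c) from fun hx => hc hx.symm]
      · have hlt : c < m := by omega
        have hmax : max m c = m := by omega
        have hM : m ≤ (t.map Prod.snd).foldl max m := (PySem.List.le_foldl_max _ _).1
        have hne : c ≠ (t.map Prod.snd).foldl max m := by omega
        simp [gphAltLoop, hgt, heq, ih, List.filter, hmax, hne]

-- ===== VERDICT (by name: the statement is the Claim_ definition above) =====
theorem get_peak_hours_py_spec : Claim_equal_get_peak_hours_py := by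
  unfold Claim_equal_get_peak_hours_py
  intro hour_stats _
  unfold Spec_get_peak_hours_py
  cases hour_stats with
  | nil => simp [get_peak_hours_py, get_peak_hours_py_alt, gphAltLoop]
  | cons hd t =>
    obtain ⟨h, c⟩ := hd
    have hmax := PySem.List.max?_id_cons (x := c) (t := t.map Prod.snd)
    simp [get_peak_hours_py, get_peak_hours_py_alt, gphAltLoop, gphAltLoop_some,
      hmax, List.filter]
    by_cases hz : (t.map Prod.snd).foldl max c = 0 <;>
      by_cases hc : (t.map Prod.snd).foldl max c = c <;>
        simp [hz, hc] <;>
        simp [show ¬ (c = (t.map Prod.snd).foldl max c) from fun hx => hc hx.symm]
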